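-- pv_equiv track=rewrite | github.com/chenxy3791/leetcode | No2038-remove-colored-pieces-if-both-neighbors-are-the-same-color-medium.py | winnerOfGame2
-- ===== SOURCE A (Python) =====
-- def winnerOfGame2(colors: str) -> bool:
--     def actionSearch(player):
--         # Search for possible action
--         num_action = 0
--         cnt    = 0
--         for k,c in enumerate(colors):
--             if c != player:
--                 cnt  = 0
--             else:
--                 if cnt == 0:
--                     cnt += 1
--                 elif cnt == 1:
--                     cnt += 1
--                 else:
--                     num_action += 1
--         return num_action
--     A_action = actionSearch('A')
--     B_action = actionSearch('B')
--
--     return A_action > B_action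
-- ===== SOURCE B (Python) =====
-- from itertools import groupby
--
-- def winnerOfGame2(colors: str) -> bool:
--     a_moves = 0
--     b_moves = 0
--     for ch, grp in groupby(colors):
--         n = sum(1 for _ in grp)
--         if ch == 'A':
--             a_moves += max(n - 2, 0)
--         elif ch == 'B':
--             b_moves += max(n - 2, 0)
--     return a_moves > b_moves
-- ===== Notes on version B (the rewrite author's own statement) =====
-- stated objective: idiomatic
-- what changed: Replaces the per-character saturating counter run twice (once per player) with a single itertools.groupby pass over maximal runs, adding the closed form max(len-2,0) per run to the matching player's tally.
import Mathlib
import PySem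

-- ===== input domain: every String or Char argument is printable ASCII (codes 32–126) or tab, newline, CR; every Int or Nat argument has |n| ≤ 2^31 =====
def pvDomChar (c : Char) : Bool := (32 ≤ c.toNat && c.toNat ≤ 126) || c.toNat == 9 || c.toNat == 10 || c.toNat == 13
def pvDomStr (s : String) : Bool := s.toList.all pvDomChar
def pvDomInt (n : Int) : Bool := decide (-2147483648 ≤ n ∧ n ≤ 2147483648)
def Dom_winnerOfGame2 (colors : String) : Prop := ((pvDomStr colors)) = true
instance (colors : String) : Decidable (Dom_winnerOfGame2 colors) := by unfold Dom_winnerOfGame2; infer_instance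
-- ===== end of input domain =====

-- B replaces A's per-character saturating counter (run once per player) with a single
-- groupby pass over maximal runs, adding max(len-2,0) per run; same cost, more idiomatic.

-- ===== PORT A =====
-- one step of A's actionSearch loop; state = (num_action, cnt)
def pvStepA (player : Char) (s : Int × Int) (c : Char) : Int × Int :=
  if c ≠ player then (s.1, 0)
  else if s.2 = 0 then (s.1, s.2 + 1)
  else if s.2 = 1 then (s.1, s.2 + 1)
  else (s.1 + 1, s.2)

def pvActionSearch (colors : String) (player : Char) : Int :=
  (colors.toList.foldl (pvStepA player) (0, 0)).1

def winnerOfGame2 (colors : String) : Bool :=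
  decide (pvActionSearch colors 'A' > pvActionSearch colors 'B')

-- ===== PORT B =====
-- itertools.groupby: one left-to-right pass building the maximal runs (reversed, then reversed back)
def pvGroupStep (acc : List (Char × Nat)) (c : Char) : List (Char × Nat) :=
  match acc with
  | (d, n) :: rest => if c = d then (d, n + 1) :: rest else (c, 1) :: (d, n) :: rest
  | [] => [(c, 1)]

def pvGroupby (l : List Char) : List (Char × Nat) :=
  (l.foldl pvGroupStep []).reverse

-- the loop body of B: add max(n-2,0) to the matching player's tally
def pvAddRun (ab : Int × Int) (p : Char × Nat) : Int × Int :=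
  if p.1 = 'A' then (ab.1 + max ((p.2 : Int) - 2) 0, ab.2)
  else if p.1 = 'B' then (ab.1, ab.2 + max ((p.2 : Int) - 2) 0)
  else ab

def winnerOfGame2_alt (colors : String) : Bool :=
  let ab := (pvGroupby colors.toList).foldl pvAddRun (0, 0)
  decide (ab.1 > ab.2)

-- ===== PRECONDITION & SPEC =====
def Spec_winnerOfGame2 (colors : String) (out : Bool) : Prop := out = winnerOfGame2_alt colors
instance (colors : String) (out : Bool) : Decidable (Spec_winnerOfGame2 colors out) := by unfold Spec_winnerOfGame2; infer_instance

-- ===== CLAIM (what is proved, stated in full; the proofs are below) =====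
def Claim_equal_winnerOfGame2 : Prop := ∀ (colors : String), Dom_winnerOfGame2 colors → Spec_winnerOfGame2 colors (winnerOfGame2 colors)

-- ===== LEMMAS AND PROOFS =====

-- moves contributed by player p's runs: sum of max(len-2,0)
def pvMoves (p : Char) : List (Char × Nat) → Int
  | [] => 0
  | (d, n) :: rest => (if d = p then max ((n : Int) - 2) 0 else 0) + pvMoves p rest

-- A's cnt as a function of the (reversed) run list
def pvCnt (p : Char) : List (Char × Nat) → Int
  | [] => 0
  | (d, n) :: _ => if d = p then min (n : Int) 2 else 0

theorem pvStep_sim (p c : Char) (rs : List (Char × Nat)) :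
    pvStepA p (pvMoves p rs, pvCnt p rs) c
      = (pvMoves p (pvGroupStep rs c), pvCnt p (pvGroupStep rs c)) := by
  cases rs with
  | nil =>
      by_cases h : c = p <;>
        simp [pvStepA, pvGroupStep, pvMoves, pvCnt, h]
  | cons hd tl =>
      obtain ⟨d, n⟩ := hd
      by_cases hcd : c = d <;> by_cases hcp : c = p
      · subst hcd; subst hcp
        simp only [pvStepA, pvGroupStep, pvMoves, pvCnt, ne_eq, not_true_eq_false,
          if_false, if_true, Prod.ext_iff]
        split_ifs <;> simp_all <;> omega
      · subst hcd
        simp [pvStepA, pvGroupStep, pvMoves, pvCnt, fun h : c = p => hcp h]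
      · subst hcp
        have hdp : ¬ d = c := fun h => hcd h.symm
        simp [pvStepA, pvGroupStep, pvMoves, pvCnt, hcd, hdp]
      · simp [pvStepA, pvGroupStep, pvMoves, pvCnt, hcd, hcp]

theorem pvFold_sim (p : Char) (l : List Char) :
    l.foldl (pvStepA p) (0, 0)
      = (pvMoves p (l.foldl pvGroupStep []), pvCnt p (l.foldl pvGroupStep [])) := by
  induction l using List.reverseRecOn with
  | nil => simp [pvMoves, pvCnt]
  | append_singleton l c ih =>
      rw [List.foldl_append, List.foldl_append, ih]
      simp [pvStep_sim]

theorem pvMoves_append (p : Char) (l₁ l₂ : List (Char × Nat)) :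
    pvMoves p (l₁ ++ l₂) = pvMoves p l₁ + pvMoves p l₂ := by
  induction l₁ with
  | nil => simp [pvMoves]
  | cons hd tl ih => simp [pvMoves, ih]; ring

theorem pvMoves_reverse (p : Char) (rs : List (Char × Nat)) :
    pvMoves p rs.reverse = pvMoves p rs := by
  induction rs with
  | nil => rfl
  | cons hd tl ih =>
      simp [pvMoves, List.reverse_cons, pvMoves_append, ih]
      ring

theorem pvAddRun_fold (rs : List (Char × Nat)) (x y : Int) :
    rs.foldl pvAddRun (x, y) = (x + pvMoves 'A' rs, y + pvMoves 'B' rs) := by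
  induction rs generalizing x y with
  | nil => simp [pvMoves]
  | cons hd tl ih =>
      obtain ⟨d, n⟩ := hd
      simp only [List.foldl_cons, pvAddRun, pvMoves, ih]
      by_cases hA : d = 'A'
      · simp [hA, add_assoc]
      · by_cases hB : d = 'B' <;> simp [hA, hB, add_assoc]

-- ===== VERDICT (by name: the statement is the Claim_ definition above) =====
theorem winnerOfGame2_spec : Claim_equal_winnerOfGame2 := by
  intro colors _
  unfold Spec_winnerOfGame2 winnerOfGame2 winnerOfGame2_alt pvActionSearch pvGroupby
  rw [pvFold_sim, pvFold_sim, pvAddRun_fold]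
  simp [pvMoves_reverse]
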